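-- pv_equiv track=rewrite | github.com/bradyz/sandbox | challenges/ut-acm-9-4/palindrome.py | solve
-- ===== SOURCE A (Python) =====
-- def solve(w):
--     c = 0
--
--     for i in range(len(w) // 2):
--         if w[i] != w[len(w) - 1 - i]:
--             if c > 0:
--                 return "NO"
--             c += 1
--         i += 1
--
--     return "YES"
-- ===== SOURCE B (Python) =====
-- def solve(w):
--     n = len(w)
--     r = w[::-1]
--     k = next((i for i in range(n // 2) if w[i] != r[i]), None)
--     if k is None:
--         return "YES"
--     inner = w[k + 1 : n - k - 1]
--     return "YES" if inner == inner[::-1] else "NO"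
-- ===== Notes on version B (the rewrite author's own statement) =====
-- stated objective: alternative
-- what changed: Instead of counting mismatched pairs with an early exit, B locates the first index where w disagrees with its reverse and then accepts iff the inner substring obtained by dropping that mismatched pair is an exact palindrome (slice equality with its reverse).
import Mathlib
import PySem

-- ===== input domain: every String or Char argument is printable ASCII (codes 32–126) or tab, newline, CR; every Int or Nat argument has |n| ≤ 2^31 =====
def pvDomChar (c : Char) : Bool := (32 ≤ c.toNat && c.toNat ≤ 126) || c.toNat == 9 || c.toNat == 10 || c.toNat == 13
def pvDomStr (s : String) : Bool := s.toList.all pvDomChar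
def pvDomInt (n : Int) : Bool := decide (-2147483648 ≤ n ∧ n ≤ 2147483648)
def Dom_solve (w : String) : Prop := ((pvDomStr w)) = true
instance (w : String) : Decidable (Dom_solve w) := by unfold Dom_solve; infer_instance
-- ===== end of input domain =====

-- B replaces A's mismatch-counting loop with early exit by a different decomposition: find the
-- FIRST index where w disagrees with its reverse, then accept iff the inner substring obtained by
-- dropping that mismatched pair is an exact palindrome; objective: alternative.

-- ===== PORT A =====
-- the for-loop over range(len(w)//2) with counter c and early 'return "NO"'
def solveLoop (l : List Char) (n : Int) : List Int → Int → String
  | [], _ => "YES"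
  | i :: rest, c =>
    if PySem.List.pyGet? l i ≠ PySem.List.pyGet? l (n - 1 - i) then
      if c > 0 then "NO" else solveLoop l n rest (c + 1)
    else solveLoop l n rest c

def solve (w : String) : String :=
  let l := w.toList
  let n : Int := PySem.Str.len w
  solveLoop l n (PySem.List.pyRange 0 (PySem.Int.floordiv n 2) 1) 0

-- ===== PORT B =====
def solve_alt (w : String) : String :=
  let l := w.toList
  let n : Int := PySem.Str.len w
  let r := l.reverse  -- w[::-1]; PySem.List.slice?_none_none_neg_one
  -- next((i for i in range(n//2) if w[i] != r[i]), None)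
  match (PySem.List.pyRange 0 (PySem.Int.floordiv n 2) 1).find?
      (fun i => PySem.List.pyGet? l i != PySem.List.pyGet? r i) with
  | none => "YES"
  | some k =>
      -- inner = w[k+1 : n-k-1]
      let inner := PySem.List.slice l (some (k + 1)) (some (n - k - 1))
      if inner = inner.reverse then "YES" else "NO"

-- ===== PRECONDITION & SPEC =====
def Spec_solve (w : String) (out : String) : Prop := out = solve_alt w
instance (w : String) (out : String) : Decidable (Spec_solve w out) := by unfold Spec_solve; infer_instance

-- ===== CLAIM (what is proved, stated in full; the proofs are below) =====
def Claim_equal_solve : Prop := ∀ (w : String), Dom_solve w → Spec_solve w (solve w)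

-- ===== LEMMAS AND PROOFS =====

-- Bool mismatch predicate at half-index i (used only by the proofs)
def mism (l : List Char) (i : Nat) : Bool := l[i]? != l[l.length - 1 - i]?

-- A's loop computes: YES iff c + (number of mismatching indices left) ≤ 1 (the loop keeps c ≤ 1)
theorem solveLoop_eq (l : List Char) (n : Int) (is : List Int) (c : Int)
    (hc0 : 0 ≤ c) (hc1 : c ≤ 1) :
    solveLoop l n is c =
      if c + (is.countP (fun i => PySem.List.pyGet? l i != PySem.List.pyGet? l (n - 1 - i)) : Int) ≤ 1
      then "YES" else "NO" := by
  induction is generalizing c with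
  | nil =>
    rw [solveLoop, if_pos (by simp [List.countP_nil]; omega)]
  | cons i rest ih =>
    rw [solveLoop]
    by_cases h : PySem.List.pyGet? l i = PySem.List.pyGet? l (n - 1 - i)
    · rw [if_neg (by simpa using h), ih c hc0 hc1]
      apply if_congr _ rfl rfl
      simp [h]
    · rw [if_pos h]
      by_cases hc' : c > 0
      · rw [if_pos hc']
        have hcond : ¬ (c + (((i :: rest).countP (fun i => PySem.List.pyGet? l i != PySem.List.pyGet? l (n - 1 - i)) : Nat) : Int) ≤ 1) := by
          simp only [List.countP_cons, bne_iff_ne, ne_eq, h, not_false_eq_true, if_true]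
          push_cast
          omega
        rw [if_neg hcond]
      · have hcz : c = 0 := by omega
        subst hcz
        rw [if_neg hc', ih (0 + 1) (by omega) (by omega)]
        apply if_congr _ rfl rfl
        simp only [List.countP_cons, bne_iff_ne, ne_eq, h, not_false_eq_true, if_true]
        push_cast
        omega

-- find? only looks at members, so pointwise-equal-on-members predicates agree
theorem find?_congr_mem {α : Type} {p q : α → Bool} (xs : List α)
    (h : ∀ a ∈ xs, p a = q a) : xs.find? p = xs.find? q := by
  induction xs with
  | nil => rfl
  | cons x xs ih =>
    have hx := h x (by simp)
    rw [List.find?_cons, List.find?_cons, hx, ih (fun a ha => h a (by simp [ha]))]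

-- characterisation of find? on List.range: first index satisfying p
theorem find?_range_some {p : Nat → Bool} {h k : Nat}
    (hf : (List.range h).find? p = some k) :
    k < h ∧ p k = true ∧ ∀ j < k, p j = false := by
  rcases List.find?_eq_some_iff_append.mp hf with ⟨hp, as, bs, heq, hall⟩
  have hk : k < h := List.mem_range.mp (by rw [heq]; simp)
  have hlen : as.length < h := by
    have := congrArg List.length heq
    simp at this
    omega
  have haslen : as.length = k := by
    have h1 : (List.range h)[as.length]'(by simpa using hlen) = k := by
      simp only [heq]
      rw [List.getElem_append_right (Nat.le_refl as.length)]
      simp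
    simpa using h1
  refine ⟨hk, hp, fun j hj => ?_⟩
  have hjh : j < h := by omega
  have hjget : as[j]'(by omega) = j := by
    have h2 : (List.range h)[j]'(by simpa using hjh) = as[j]'(by omega) := by
      simp only [heq]
      exact List.getElem_append_left (by omega)
    simpa using h2.symm
  have h3 := hall (as[j]'(by omega)) (List.getElem_mem (by omega))
  rw [hjget] at h3
  simpa using h3

-- list palindrome, index by index (Option form keeps the bookkeeping simple)
theorem pal_iff (s : List Char) :
    s = s.reverse ↔ ∀ j < s.length, s[j]? = s[s.length - 1 - j]? := by
  constructor
  · intro hp j hj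
    conv_rhs => rw [← List.getElem?_reverse hj, ← hp]
  · intro hall
    apply List.ext_getElem?
    intro j
    by_cases hj : j < s.length
    · rw [List.getElem?_reverse hj]
      exact hall j hj
    · rw [List.getElem?_eq_none (by omega), List.getElem?_eq_none (by simpa using (by omega : s.length ≤ j))]

-- ===== VERDICT (by name: the statement is the Claim_ definition above) =====
theorem solve_spec : Claim_equal_solve := by
  intro w _
  show solve w = solve_alt w
  simp only [solve, solve_alt, PySem.Str.len_eq]
  set l := w.toList with hl
  set n := l.length with hnn
  set h := n / 2 with hh
  have hhn : h ≤ n := Nat.div_le_self n 2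
  have hfd : PySem.Int.floordiv (n : Int) 2 = ((h : Nat) : Int) := by
    exact_mod_cast PySem.Int.floordiv_natCast n 2
  have hrl : PySem.List.pyRange 0 ((h : Nat) : Int) 1
      = (List.range h).map (fun k : Nat => ((k : Nat) : Int)) := by
    rw [PySem.List.pyRange_one]
    simp
  rw [hfd, hrl, solveLoop_eq _ _ _ 0 (le_refl 0) (by omega), List.countP_map, List.find?_map]
  have hpredA : ∀ k < h,
      (PySem.List.pyGet? l (k : Int) != PySem.List.pyGet? l ((n : Int) - 1 - (k : Int))) = mism l k := by
    intro k hk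
    have hkn : k < n := by omega
    have hcast : (n : Int) - 1 - (k : Int) = ((n - 1 - k : Nat) : Int) := by
      omega
    rw [hcast, PySem.List.pyGet?_natCast, PySem.List.pyGet?_natCast]
    rfl
  have hpredB : ∀ k < h,
      (PySem.List.pyGet? l (k : Int) != PySem.List.pyGet? l.reverse (k : Int)) = mism l k := by
    intro k hk
    have hkn : k < n := by omega
    rw [PySem.List.pyGet?_natCast, PySem.List.pyGet?_natCast,
        List.getElem?_reverse (by rw [← hnn]; omega)]
    rfl
  rw [show (List.range h).countP
        ((fun i => PySem.List.pyGet? l i != PySem.List.pyGet? l ((n : Int) - 1 - i)) ∘ (fun k : Nat => ((k : Nat) : Int)))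
      = (List.range h).countP (mism l) from
    List.countP_congr (fun k hk => by
      rw [Function.comp_apply, hpredA k (List.mem_range.mp hk)])]
  rw [show (List.range h).find?
        ((fun i => PySem.List.pyGet? l i != PySem.List.pyGet? l.reverse i) ∘ (fun k : Nat => ((k : Nat) : Int)))
      = (List.range h).find? (mism l) from
    find?_congr_mem _ (fun k hk => by
      rw [Function.comp_apply, hpredB k (List.mem_range.mp hk)])]
  cases hf : (List.range h).find? (mism l) with
  | none =>
    have hz : (List.range h).countP (mism l) = 0 :=
      List.countP_eq_zero.mpr (fun a ha => by simp [List.find?_eq_none.mp hf a ha])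
    rw [hz]
    simp
  | some k =>
    obtain ⟨hk, hpk, hmin⟩ := find?_range_some hf
    simp only [Option.map_some]
    have hkn : k < n := by omega
    -- count splits as 1 + the count on the indices after k
    have hsplit : (List.range h).countP (mism l)
        = 1 + (List.range (h - k - 1)).countP (fun j => mism l (k + 1 + j)) := by
      have hde : h = (k + 1) + (h - k - 1) := by omega
      conv_lhs => rw [hde]
      rw [List.range_add, List.countP_append, List.range_succ, List.countP_append,
          List.countP_map]
      have h0 : (List.range k).countP (mism l) = 0 :=
        List.countP_eq_zero.mpr (fun a ha => by simp [hmin a (List.mem_range.mp ha)])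
      simp [h0, hpk]
      rfl
    -- B's slice
    have hsl : PySem.List.slice l (some ((k : Int) + 1)) (some ((n : Int) - (k : Int) - 1))
        = (l.drop (k + 1)).take (n - k - 1 - (k + 1)) := by
      rw [PySem.List.slice_toNat _ (by omega) (by omega)]
      congr 1 <;> omega
    simp only [← hl, ← hnn]
    simp only [hsl]
    set inner := (l.drop (k + 1)).take (n - k - 1 - (k + 1)) with hinner
    have hilen : inner.length = n - 2 * k - 2 := by
      rw [hinner, List.length_take, List.length_drop, ← hnn]
      omega
    have higet : ∀ j < inner.length, inner[j]? = l[k + 1 + j]? := by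
      intro j hj
      rw [hinner, List.getElem?_take, if_pos (by rw [hilen] at hj; omega), List.getElem?_drop]
    -- inner palindrome ↔ no further mismatch in the half-range
    have hiff : inner = inner.reverse ↔ ∀ j < h - k - 1, mism l (k + 1 + j) = false := by
      rw [pal_iff]
      constructor
      · intro hp j hj
        have hjlen : j < inner.length := by rw [hilen]; omega
        have hpj := hp j hjlen
        rw [higet j hjlen, higet _ (by omega), hilen] at hpj
        have harith : k + 1 + (n - 2 * k - 2 - 1 - j) = n - 1 - (k + 1 + j) := by omega
        rw [harith] at hpj
        simp [mism, ← hnn, hpj]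
      · intro hall j hj
        rw [higet j hj, higet _ (by omega), hilen]
        have hjlen : j < n - 2 * k - 2 := by rw [hilen] at hj; omega
        have harith : k + 1 + (n - 2 * k - 2 - 1 - j) = n - 1 - (k + 1 + j) := by omega
        rw [harith]
        set i := k + 1 + j with hi
        by_cases hcase : i < h
        · have h4 := hall j (by omega)
          simp only [mism, ← hnn, ← hi] at h4
          exact bne_eq_false_iff_eq.mp h4
        · by_cases hmid : n - 1 - i = i
          · rw [hmid]
          · have h5 := hall (n - 1 - i - (k + 1)) (by omega)
            have harr : k + 1 + (n - 1 - i - (k + 1)) = n - 1 - i := by omega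
            rw [harr] at h5
            have hmir : n - 1 - (n - 1 - i) = i := by omega
            simp only [mism, ← hnn, hmir] at h5
            exact (bne_eq_false_iff_eq.mp h5).symm
    rw [hsplit]
    by_cases hyes : (List.range (h - k - 1)).countP (fun j => mism l (k + 1 + j)) = 0
    · rw [if_pos (by rw [hyes]; norm_num)]
      have hpal : inner = inner.reverse := hiff.mpr
        (fun j hj => by simpa using List.countP_eq_zero.mp hyes j (List.mem_range.mpr hj))
      rw [if_pos hpal]
    · rw [if_neg (by push_cast; omega)]
      have hnpal : ¬ inner = inner.reverse := by
        intro hp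
        exact hyes (List.countP_eq_zero.mpr
          (fun a ha => by simp [hiff.mp hp a (List.mem_range.mp ha)]))
      rw [if_neg hnpal]
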